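-- pv_equiv track=rewrite | github.com/heymrun/heym | backend/app/services/portal_progress.py | compact_portal_progress_path
-- ===== SOURCE A (Python) =====
-- from dataclasses import dataclass, field
--
-- @dataclass(frozen=True)
-- class RepeatSpan:
--     """A contiguous repeated block within a node label sequence."""
--
--     block_length: int
--     repeats: int
--
-- def _blocks_match(node_labels: list[str], start: int, block_length: int, repeat_index: int) -> bool:
--     left_start = start
--     right_start = start + (repeat_index * block_length)
--
--     for offset in range(block_length):
--         if node_labels[left_start + offset] != node_labels[right_start + offset]:
--             return False
--     return True
--
-- def _find_repeat_span(node_labels: list[str], start: int) -> RepeatSpan | None: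
--     remaining = len(node_labels) - start
--     max_block_length = remaining // 2
--     best_span: RepeatSpan | None = None
--     best_savings = 0
--
--     for block_length in range(1, max_block_length + 1):
--         repeats = 1
--         while start + ((repeats + 1) * block_length) <= len(node_labels) and _blocks_match(
--             node_labels, start, block_length, repeats
--         ):
--             repeats += 1
--
--         if repeats <= 1:
--             continue
--
--         savings = (block_length * repeats) - block_length
--         if savings > best_savings or (
--             savings == best_savings
--             and best_span is not None
--             and block_length > best_span.block_length
--         ):
--             best_span = RepeatSpan(block_length=block_length, repeats=repeats)
--             best_savings = savings
--
--     return best_span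
--
-- def compact_portal_progress_path(node_labels: list[str]) -> list[str]:
--     """Collapse contiguous loop cycles into `Node(count)` progress labels."""
--
--     compact_labels: list[str] = []
--     index = 0
--
--     while index < len(node_labels):
--         repeat_span = _find_repeat_span(node_labels, index)
--         if repeat_span is None:
--             compact_labels.append(node_labels[index])
--             index += 1
--             continue
--
--         for offset in range(repeat_span.block_length):
--             compact_labels.append(f"{node_labels[index + offset]}({repeat_span.repeats})")
--         index += repeat_span.block_length * repeat_span.repeats
--
--     return compact_labels
-- ===== SOURCE B (Python) =====
-- def compact_portal_progress_path(node_labels: list[str]) -> list[str]: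
--     """Collapse contiguous loop cycles into `Node(count)` progress labels.
--
--     Staged O(n^2) algorithm: for each block length L (outer loop), one
--     right-to-left sweep maintains the longest common extension of each suffix
--     with its shift by L, from which the repeat count at every start is
--     1 + lce // L in O(1); the best (savings, L, repeats) candidate per start
--     is collected into a table, and a final walk emits the compact labels.
--     """
--     n = len(node_labels)
--     best: list[tuple[int, int, int] | None] = [None] * n
--     for L in range(1, n // 2 + 1):
--         lce = 0  # longest common extension of suffix i with suffix i+L
--         for i in range(n - L - 1, -1, -1):
--             lce = lce + 1 if node_labels[i] == node_labels[i + L] else 0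
--             r = 1 + lce // L
--             if r >= 2 and i + 2 * L <= n:
--                 cand = (L * (r - 1), L, r)
--                 if best[i] is None or cand > best[i]:
--                     best[i] = cand
--     out: list[str] = []
--     i = 0
--     while i < n:
--         if best[i] is None:
--             out.append(node_labels[i])
--             i += 1
--         else:
--             _, L, r = best[i]
--             out += [f"{node_labels[i + o]}({r})" for o in range(L)]
--             i += L * r
--     return out
-- ===== Notes on version B (the rewrite author's own statement) =====
-- stated objective: alternative
-- what changed: B inverts the loop structure into staged passes: an outer loop over block lengths with one right-to-left sweep each maintains a rolling longest-common-extension with the L-shifted suffix, filling a best-span table for every start in O(1) per cell, and a separate final walk emits the labels; A instead re-scans blocks element by element inside a per-start span search interleaved with emission, which is O(n^3) worst case.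
import Mathlib
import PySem

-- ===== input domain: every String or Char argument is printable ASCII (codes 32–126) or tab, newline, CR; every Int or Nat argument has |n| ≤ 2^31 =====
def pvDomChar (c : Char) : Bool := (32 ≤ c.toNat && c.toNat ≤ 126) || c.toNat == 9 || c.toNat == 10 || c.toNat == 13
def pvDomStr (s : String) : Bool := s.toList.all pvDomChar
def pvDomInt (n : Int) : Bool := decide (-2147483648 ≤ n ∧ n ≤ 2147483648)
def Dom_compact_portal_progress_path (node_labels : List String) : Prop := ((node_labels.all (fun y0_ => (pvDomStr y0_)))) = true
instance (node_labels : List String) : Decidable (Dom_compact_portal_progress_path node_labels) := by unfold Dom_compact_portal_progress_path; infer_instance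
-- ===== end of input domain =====

-- B replaces A's interleaved per-start span search (element-by-element block re-matching) by staged
-- passes: per block length one right-to-left sweep maintains a rolling longest-common-extension and
-- fills a best-span table, and a separate final walk emits the labels (objective: alternative).

-- ===== PORT A =====
-- every index reached by A's loops is in range (guarded by the loop bounds), so getD is exact there
def pvGet (labels : List String) (i : Nat) : String := labels.getD i ""

-- for offset in range(block_length): if labels[l+o] != labels[r+o]: return False / return True
def blocksMatchGo (labels : List String) (ls rs L o : Nat) : Bool :=
  if _h : o < L then
    if pvGet labels (ls + o) ≠ pvGet labels (rs + o) then false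
    else blocksMatchGo labels ls rs L (o + 1)
  else true
termination_by L - o

def pyBlocksMatch (labels : List String) (start L j : Nat) : Bool :=
  blocksMatchGo labels start (start + j * L) L 0

-- while start + (repeats+1)*L <= n and _blocks_match(...): repeats += 1
-- (the extra '0 < L' conjunct only makes the recursion total; every call site has L ≥ 1)
def repeatsGo (labels : List String) (start L r : Nat) : Nat :=
  if h : 0 < L ∧ start + (r + 1) * L ≤ labels.length ∧ pyBlocksMatch labels start L r then
    repeatsGo labels start L (r + 1)
  else r
termination_by labels.length + 1 - r
decreasing_by
  have h1 : r + 1 ≤ (r + 1) * L := Nat.le_mul_of_pos_right _ h.1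
  omega

-- one iteration of the 'for block_length in range(1, max_block_length+1)' accumulator loop
def findSpanStep (labels : List String) (start : Nat)
    (st : Option (Nat × Nat) × Nat) (L : Nat) : Option (Nat × Nat) × Nat :=
  let r := repeatsGo labels start L 1
  if r ≤ 1 then st
  else
    let sav := L * r - L
    if st.2 < sav || (sav == st.2 && (match st.1 with
        | some (bl, _) => decide (bl < L)
        | none => false)) then
      (some (L, r), sav)
    else st

def pyFindRepeatSpan (labels : List String) (start : Nat) : Option (Nat × Nat) :=
  ((List.range' 1 ((labels.length - start) / 2)).foldl (findSpanStep labels start) (none, 0)).1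

def compactGoA (labels : List String) : Nat → Nat → List String → List String
  | 0, _, acc => acc
  | fuel + 1, idx, acc =>
    if idx < labels.length then
      match pyFindRepeatSpan labels idx with
      | none => compactGoA labels fuel (idx + 1) (acc ++ [pvGet labels idx])
      | some (L, r) =>
          compactGoA labels fuel (idx + L * r)
            ((List.range L).foldl
              (fun a o => a ++ [pvGet labels (idx + o) ++ "(" ++ PySem.Int.toStr (r : Int) ++ ")"]) acc)
    else acc

def compact_portal_progress_path (node_labels : List String) : List String :=
  compactGoA node_labels (node_labels.length + 1) 0 []

-- ===== PORT B =====
-- Python tuple > on (savings, L, r)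
def tripleGt (a b : Nat × Nat × Nat) : Bool :=
  b.1 < a.1 || (a.1 == b.1 && (b.2.1 < a.2.1 || (a.2.1 == b.2.1 && b.2.2 < a.2.2)))

-- the body of the inner sweep at index i: 'if r >= 2 and i + 2*L <= n: maybe replace best[i]'
def bUpdate (n i L lce : Nat) (b : Option (Nat × Nat × Nat)) : Option (Nat × Nat × Nat) :=
  let r := 1 + lce / L
  if 2 ≤ r ∧ i + 2 * L ≤ n then
    let cand := (L * (r - 1), L, r)
    match b with
    | none => some cand
    | some b0 => if tripleGt cand b0 then some cand else some b0
  else b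

-- 'for i in range(n - L - 1, -1, -1)': counter c is the next index + 1, carrying the rolling lce
def sweepB (labels : List String) (L : Nat) :
    Nat → Nat → List (Option (Nat × Nat × Nat)) → List (Option (Nat × Nat × Nat))
  | 0, _, best => best
  | c + 1, lce, best =>
      let lce' := if pvGet labels c = pvGet labels (c + L) then lce + 1 else 0
      sweepB labels L c lce' (best.set c (bUpdate labels.length c L lce' (best.getD c none)))

-- 'for L in range(1, n // 2 + 1)' over the best table, starting from [None] * n
def bestTable (labels : List String) : List (Option (Nat × Nat × Nat)) :=
  (List.range' 1 (labels.length / 2)).foldl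
    (fun best L => sweepB labels L (labels.length - L) 0 best)
    (List.replicate labels.length none)

-- the final emit walk over the precomputed table
def compactGoB (labels : List String) (bests : List (Option (Nat × Nat × Nat))) :
    Nat → Nat → List String → List String
  | 0, _, acc => acc
  | fuel + 1, idx, acc =>
    if idx < labels.length then
      match bests.getD idx none with
      | none => compactGoB labels bests fuel (idx + 1) (acc ++ [pvGet labels idx])
      | some (_, L, r) =>
          compactGoB labels bests fuel (idx + L * r)
            (acc ++ (List.range L).map
              (fun o => pvGet labels (idx + o) ++ "(" ++ PySem.Int.toStr (r : Int) ++ ")"))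
    else acc

def compact_portal_progress_path_alt (node_labels : List String) : List String :=
  compactGoB node_labels (bestTable node_labels) (node_labels.length + 1) 0 []

-- ===== PRECONDITION & SPEC =====
def Spec_compact_portal_progress_path (node_labels : List String) (out : List String) : Prop := out = compact_portal_progress_path_alt node_labels
instance (node_labels : List String) (out : List String) : Decidable (Spec_compact_portal_progress_path node_labels out) := by unfold Spec_compact_portal_progress_path; infer_instance

-- ===== CLAIM (what is proved, stated in full; the proofs are below) =====
def Claim_equal_compact_portal_progress_path : Prop := ∀ (node_labels : List String), Dom_compact_portal_progress_path node_labels → Spec_compact_portal_progress_path node_labels (compact_portal_progress_path node_labels)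

-- ===== LEMMAS AND PROOFS =====

-- the rolling-lce value: longest common extension of suffixes i and j, as a recursion
def lcpGo (labels : List String) (i j : Nat) : Nat :=
  if h : j < labels.length ∧ pvGet labels i = pvGet labels j then
    lcpGo labels (i + 1) (j + 1) + 1
  else 0
termination_by labels.length - j

theorem lcpGo_eq (labels : List String) (i j : Nat) :
    lcpGo labels i j =
      if j < labels.length ∧ pvGet labels i = pvGet labels j then
        lcpGo labels (i + 1) (j + 1) + 1
      else 0 := by
  rw [lcpGo]; rfl

theorem repeatsGo_unfold (labels : List String) (start L r : Nat) :
    repeatsGo labels start L r =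
      if 0 < L ∧ start + (r + 1) * L ≤ labels.length ∧ pyBlocksMatch labels start L r then
        repeatsGo labels start L (r + 1)
      else r := by
  rw [repeatsGo]; rfl

-- _blocks_match returns True iff the two blocks agree elementwise
theorem blocksMatchGo_iff (labels : List String) (ls rs L o : Nat) :
    blocksMatchGo labels ls rs L o = true ↔
      ∀ t, o ≤ t → t < L → pvGet labels (ls + t) = pvGet labels (rs + t) := by
  fun_induction blocksMatchGo labels ls rs L o with
  | case1 o h hne =>
      simp only [Bool.false_eq_true, false_iff]
      intro hall
      exact hne (hall o le_rfl h)
  | case2 o h hne ih =>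
      rw [ih]
      constructor
      · intro hrec t hot htL
        rcases Nat.eq_or_lt_of_le hot with rfl | hlt
        · exact not_not.mp hne
        · exact hrec t hlt htL
      · intro hall t h1 h2; exact hall t (Nat.le_of_succ_le h1) h2
  | case3 o h =>
      simp only [true_iff]
      intro t h1 h2
      exact ((h (lt_of_le_of_lt h1 h2)).elim)

theorem pyBlocksMatch_iff (labels : List String) (start L j : Nat) :
    pyBlocksMatch labels start L j = true ↔
      ∀ o, o < L → pvGet labels (start + o) = pvGet labels (start + j * L + o) := by
  unfold pyBlocksMatch
  rw [blocksMatchGo_iff]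
  constructor
  · intro h o hoL; exact h o (Nat.zero_le _) hoL
  · intro h t _ htL; exact h t htL

-- lcp characterisation: everything before lcp is an in-range match …
theorem lcp_lt (labels : List String) :
    ∀ t i j, t < lcpGo labels i j →
      j + t < labels.length ∧ pvGet labels (i + t) = pvGet labels (j + t) := by
  intro t
  induction t with
  | zero =>
      intro i j ht
      rw [lcpGo_eq] at ht
      split_ifs at ht with h
      · simpa using h
      · omega
  | succ t ih =>
      intro i j ht
      rw [lcpGo_eq] at ht
      split_ifs at ht with h
      · have := ih (i + 1) (j + 1) (by omega)
        have e1 : i + 1 + t = i + (t + 1) := by omega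
        have e2 : j + 1 + t = j + (t + 1) := by omega
        rw [e1, e2] at this
        exact ⟨by omega, this.2⟩
      · omega

-- … and at lcp the scan stops (out of range or mismatch)
theorem lcp_stop_aux (labels : List String) :
    ∀ k i j, labels.length - j ≤ k →
      ¬ (j + lcpGo labels i j < labels.length ∧
          pvGet labels (i + lcpGo labels i j) = pvGet labels (j + lcpGo labels i j)) := by
  intro k
  induction k with
  | zero =>
      intro i j hk
      rw [lcpGo_eq]
      split_ifs with h
      · omega
      · simpa using h
  | succ k ih =>
      intro i j hk
      rw [lcpGo_eq]
      split_ifs with h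
      · intro hc
        apply ih (i + 1) (j + 1) (by omega)
        refine ⟨by omega, ?_⟩
        have e1 : i + 1 + lcpGo labels (i + 1) (j + 1) = i + (lcpGo labels (i + 1) (j + 1) + 1) := by omega
        have e2 : j + 1 + lcpGo labels (i + 1) (j + 1) = j + (lcpGo labels (i + 1) (j + 1) + 1) := by omega
        rw [e1, e2]; exact hc.2
      · simpa using h

theorem lcp_stop (labels : List String) (i j : Nat) :
    ¬ (j + lcpGo labels i j < labels.length ∧
        pvGet labels (i + lcpGo labels i j) = pvGet labels (j + lcpGo labels i j)) :=
  lcp_stop_aux labels (labels.length - j) i j le_rfl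

-- transitivity chain: a prefix-period of length L propagates block equality
theorem chain (labels : List String) (idx L : Nat) (hL : 0 < L) :
    ∀ j o, o < L → j * L + o < lcpGo labels idx (idx + L) + L →
      pvGet labels (idx + o) = pvGet labels (idx + j * L + o) := by
  intro j
  induction j with
  | zero => intro o _ _; simp
  | succ j ih =>
      intro o hoL hlt
      have hjo : j * L + o < lcpGo labels idx (idx + L) := by
        have : (j + 1) * L = j * L + L := by ring
        omega
      have h1 := (lcp_lt labels (j * L + o) idx (idx + L) hjo).2
      have e0 : idx + (j * L + o) = idx + j * L + o := by omega
      have e1 : idx + L + (j * L + o) = idx + (j + 1) * L + o := by ring_nf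
      rw [e0, e1] at h1
      have h2 := ih o hoL (by omega)
      rw [h2]; exact h1

-- jL ≤ lcp implies the j-th block matches block 0
theorem match_of_le (labels : List String) (idx L j : Nat) (hL : 0 < L)
    (h : j * L ≤ lcpGo labels idx (idx + L)) :
    pyBlocksMatch labels idx L j = true := by
  rw [pyBlocksMatch_iff]
  intro o hoL
  exact chain labels idx L hL j o hoL (by omega)

-- at j = lcp/L + 1, if the next block still fits, it cannot match
theorem not_match_succ (labels : List String) (idx L : Nat) (hL : 0 < L)
    (hfit : idx + (lcpGo labels idx (idx + L) / L + 2) * L ≤ labels.length) :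
    pyBlocksMatch labels idx L (lcpGo labels idx (idx + L) / L + 1) = false := by
  set z := lcpGo labels idx (idx + L) with hz
  by_contra hcon
  have hm : pyBlocksMatch labels idx L (z / L + 1) = true := by
    cases h : pyBlocksMatch labels idx L (z / L + 1) with
    | false => exact absurd h hcon
    | true => rfl
  rw [pyBlocksMatch_iff] at hm
  have hrho : z % L < L := Nat.mod_lt _ hL
  apply lcp_stop labels idx (idx + L)
  rw [← hz]
  have hzlt : z < (z / L + 1) * L := by
    calc z = z / L * L + z % L := (Nat.div_add_mod' z L).symm
      _ < z / L * L + L := Nat.add_lt_add_left hrho _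
      _ = (z / L + 1) * L := by ring
  constructor
  · calc idx + L + z < idx + L + (z / L + 1) * L := by omega
      _ = idx + (z / L + 2) * L := by ring
      _ ≤ labels.length := hfit
  · have h1 : pvGet labels (idx + (z % L)) = pvGet labels (idx + (z / L + 1) * L + (z % L)) :=
      hm (z % L) hrho
    have h2 : pvGet labels (idx + (z % L)) = pvGet labels (idx + z / L * L + (z % L)) :=
      chain labels idx L hL (z / L) (z % L) hrho
        (by calc z / L * L + z % L = z := Nat.div_add_mod' z L
              _ < z + L := by omega)
    have e1 : idx + z / L * L + (z % L) = idx + z := by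
      calc idx + z / L * L + (z % L) = idx + (z / L * L + z % L) := by ring
        _ = idx + z := by rw [Nat.div_add_mod']
    have e2 : idx + (z / L + 1) * L + (z % L) = idx + L + z := by
      calc idx + (z / L + 1) * L + (z % L) = idx + L + (z / L * L + z % L) := by ring
        _ = idx + L + z := by rw [Nat.div_add_mod']
    rw [e1] at h2; rw [e2] at h1
    rw [← h2, h1]

-- if the lcp scan advanced at all, everything it saw is in range
theorem lcp_le_len (labels : List String) (idx L : Nat) (h : 0 < lcpGo labels idx (idx + L)) :
    idx + L + lcpGo labels idx (idx + L) ≤ labels.length := by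
  have := (lcp_lt labels (lcpGo labels idx (idx + L) - 1) idx (idx + L) (by omega)).1
  omega

-- the while-loop repeat count equals 1 + lcp / L
theorem repeatsGo_eq_aux (labels : List String) (idx L : Nat) (hL : 0 < L) :
    ∀ k r, 1 ≤ r → r ≤ lcpGo labels idx (idx + L) / L + 1 →
      lcpGo labels idx (idx + L) / L + 1 - r = k →
      repeatsGo labels idx L r = lcpGo labels idx (idx + L) / L + 1 := by
  intro k
  induction k with
  | zero =>
      intro r hr1 hrq hk
      set z := lcpGo labels idx (idx + L) with hz
      have heq : r = z / L + 1 := by omega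
      rw [repeatsGo_unfold, if_neg]
      · exact heq
      · rintro ⟨-, hfit, hmatch⟩
        have hfit2 : idx + (z / L + 2) * L ≤ labels.length := by
          have e : (r + 1) * L = (z / L + 2) * L := by rw [heq]
          omega
        have hnm := not_match_succ labels idx L hL hfit2
        rw [heq] at hmatch
        rw [hmatch] at hnm
        cases hnm
  | succ k ih =>
      intro r hr1 hrq hk
      set z := lcpGo labels idx (idx + L) with hz
      have hlt : r ≤ z / L := by omega
      have hrz : r * L ≤ z := by
        calc r * L ≤ z / L * L := Nat.mul_le_mul_right _ hlt
          _ ≤ z := Nat.div_mul_le_self _ _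
      have hzpos : 0 < z := by
        have : 1 * L ≤ z := by
          calc 1 * L ≤ r * L := Nat.mul_le_mul_right _ hr1
            _ ≤ z := hrz
        omega
      have hrange : idx + L + z ≤ labels.length := lcp_le_len labels idx L hzpos
      rw [repeatsGo_unfold, if_pos]
      · exact ih (r + 1) (by omega) (by omega) (by omega)
      · refine ⟨hL, ?_, match_of_le labels idx L r hL hrz⟩
        have e : (r + 1) * L = r * L + L := by ring
        omega

theorem repeatsGo_one (labels : List String) (idx L : Nat) (hL : 0 < L) :
    repeatsGo labels idx L 1 = 1 + lcpGo labels idx (idx + L) / L := by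
  have h := repeatsGo_eq_aux labels idx L hL (lcpGo labels idx (idx + L) / L) 1
    le_rfl (Nat.le_add_left 1 _) (by rw [Nat.add_sub_cancel])
  rw [h, Nat.add_comm]

-- getD after set, same / different index
theorem getD_set_eq {α : Type} (l : List α) (i : Nat) (v d : α) (h : i < l.length) :
    (l.set i v).getD i d = v := by
  simp [List.getD_eq_getElem?_getD, h]

theorem getD_set_ne {α : Type} (l : List α) (i j : Nat) (v d : α) (h : i ≠ j) :
    (l.set i v).getD j d = l.getD j d := by
  simp [List.getD_eq_getElem?_getD, h]

-- the per-index effect of one sweep, stated pointwise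
def bStep (labels : List String) (j : Nat) (b : Option (Nat × Nat × Nat)) (L : Nat) :
    Option (Nat × Nat × Nat) :=
  bUpdate labels.length j L (lcpGo labels j (j + L)) b

theorem sweepB_length (labels : List String) (L : Nat) :
    ∀ c lce best, (sweepB labels L c lce best).length = best.length := by
  intro c
  induction c with
  | zero => intro lce best; rfl
  | succ c ih =>
      intro lce best
      rw [sweepB, ih, List.length_set]

-- sweep invariant: the carried lce equals the lce recursion, and each cell gets exactly one update
theorem sweepB_getD (labels : List String) (L : Nat) :
    ∀ c lce best, c + L ≤ labels.length → c ≤ best.length →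
      lce = lcpGo labels c (c + L) →
      ∀ j, (sweepB labels L c lce best).getD j none =
        if j < c then bStep labels j (best.getD j none) L else best.getD j none := by
  intro c
  induction c with
  | zero =>
      intro lce best _ _ _ j
      simp [sweepB]
  | succ c ih =>
      intro lce best hcl hcb hlce j
      rw [sweepB]
      have hrange : c + L < labels.length := by omega
      have hlce' : (if pvGet labels c = pvGet labels (c + L) then lce + 1 else 0) =
          lcpGo labels c (c + L) := by
        rw [lcpGo_eq labels c (c + L)]
        by_cases he : pvGet labels c = pvGet labels (c + L)
        · rw [if_pos he, if_pos ⟨hrange, he⟩, hlce]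
          have e : c + 1 + L = c + L + 1 := by omega
          rw [e]
        · rw [if_neg he, if_neg (by intro h; exact he h.2)]
      rw [hlce']
      rw [ih (lcpGo labels c (c + L))
        (best.set c (bUpdate labels.length c L (lcpGo labels c (c + L)) (best.getD c none)))
        (by omega) (by simp; omega) rfl j]
      by_cases hj : j < c
      · rw [if_pos hj, if_pos (by omega : j < c + 1),
          getD_set_ne best c j _ none (by omega)]
      · rw [if_neg hj]
        by_cases hj2 : j = c
        · subst hj2
          rw [if_pos (by omega : j < j + 1),
            getD_set_eq best j _ none (by omega)]
          rfl
        · rw [if_neg (by omega : ¬ j < c + 1),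
            getD_set_ne best c j _ none (by omega)]

-- for a start cell past n - L (or for L > n) the update is the identity
theorem bUpdate_id (n j L lce : Nat) (b : Option (Nat × Nat × Nat)) (h : ¬ j + 2 * L ≤ n) :
    bUpdate n j L lce b = b := by
  unfold bUpdate
  rw [if_neg (by intro hc; exact h hc.2)]

-- the whole sweep, per cell, for every L ≥ 1 (including L > n, where it is empty)
theorem sweep_cell (labels : List String) (L : Nat) (hL : 0 < L)
    (best : List (Option (Nat × Nat × Nat))) (hlen : best.length = labels.length) (j : Nat)
    (hj : j < labels.length) :
    (sweepB labels L (labels.length - L) 0 best).getD j none =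
      bStep labels j (best.getD j none) L := by
  by_cases hLn : L ≤ labels.length
  · have h0 : (0 : Nat) = lcpGo labels (labels.length - L) (labels.length - L + L) := by
      rw [lcpGo_eq]
      rw [if_neg]
      rintro ⟨hlt, -⟩
      omega
    rw [sweepB_getD labels L (labels.length - L) 0 best (by omega) (by omega) h0 j]
    by_cases hj2 : j < labels.length - L
    · rw [if_pos hj2]
    · rw [if_neg hj2]
      unfold bStep
      rw [bUpdate_id _ _ _ _ _ (by omega)]
  · have hz : labels.length - L = 0 := by omega
    rw [hz]
    show best.getD j none = bStep labels j (best.getD j none) L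
    unfold bStep
    rw [bUpdate_id _ _ _ _ _ (by omega)]

-- projecting the outer fold over block lengths to one cell
theorem fold_cell (labels : List String) (j : Nat) (hj : j < labels.length) :
    ∀ (Ls : List Nat), (∀ L ∈ Ls, 0 < L) →
      ∀ best, best.length = labels.length →
      (Ls.foldl (fun best L => sweepB labels L (labels.length - L) 0 best) best).getD j none =
        Ls.foldl (bStep labels j) (best.getD j none) := by
  intro Ls
  induction Ls with
  | nil => intro _ best _; rfl
  | cons L t ih =>
      intro hpos best hlen
      simp only [List.foldl_cons]
      rw [ih (fun x hx => hpos x (List.mem_cons_of_mem _ hx)) _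
        (by rw [sweepB_length]; exact hlen)]
      rw [sweep_cell labels L (hpos L List.mem_cons_self) best hlen j hj]

-- a fold over no-op steps is the identity
theorem foldl_id {α β : Type} (f : α → β → α) :
    ∀ (l : List β) (a : α), (∀ x ∈ l, ∀ b, f b x = b) → l.foldl f a = a := by
  intro l
  induction l with
  | nil => intro a _; rfl
  | cons x t ih =>
      intro a h
      simp only [List.foldl_cons]
      rw [h x List.mem_cons_self a]
      exact ih a (fun y hy b => h y (List.mem_cons_of_mem _ hy) b)

-- block lengths past (n - j) / 2 never fire at cell j, so the fold can be trimmed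
theorem fold_trim (labels : List String) (j : Nat) (hj : j < labels.length)
    (b0 : Option (Nat × Nat × Nat)) :
    (List.range' 1 (labels.length / 2)).foldl (bStep labels j) b0 =
      (List.range' 1 ((labels.length - j) / 2)).foldl (bStep labels j) b0 := by
  have hle : (labels.length - j) / 2 ≤ labels.length / 2 :=
    Nat.div_le_div_right (by omega)
  have hsplit : List.range' 1 (labels.length / 2) =
      List.range' 1 ((labels.length - j) / 2) ++
      List.range' (1 + (labels.length - j) / 2) (labels.length / 2 - (labels.length - j) / 2) := by
    rw [List.range'_append_1]
    congr 1
    omega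
  rw [hsplit, List.foldl_append]
  rw [foldl_id]
  intro L hL b
  rw [List.mem_range'_1] at hL
  unfold bStep bUpdate
  rw [if_neg]
  rintro ⟨-, hfit⟩
  have h2 : 2 * L ≤ labels.length - j := by omega
  have : L ≤ (labels.length - j) / 2 := by
    rw [Nat.le_div_iff_mul_le (by omega)]
    omega
  omega

-- relation between A's accumulator state and B's best candidate
def spanRel (stA : Option (Nat × Nat) × Nat) (stB : Option (Nat × Nat × Nat)) (bound : Nat) : Prop :=
  (stA = (none, 0) ∧ stB = none) ∨
  (∃ L0 r0, L0 < bound ∧ 0 < L0 ∧ 2 ≤ r0 ∧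
    stA = (some (L0, r0), L0 * r0 - L0) ∧ stB = some (L0 * (r0 - 1), L0, r0))

-- one step of both selection loops preserves the relation
theorem step_rel (labels : List String) (idx : Nat) (stA : Option (Nat × Nat) × Nat)
    (stB : Option (Nat × Nat × Nat)) (L : Nat)
    (hL : 0 < L) (hfit : idx + 2 * L ≤ labels.length) (hrel : spanRel stA stB L) :
    spanRel (findSpanStep labels idx stA L) (bStep labels idx stB L) (L + 1) := by
  have hr := repeatsGo_one labels idx L hL
  unfold findSpanStep bStep bUpdate
  simp only [← hr]
  set R := repeatsGo labels idx L 1 with hRdef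
  by_cases hc : R ≤ 1
  · rw [if_pos hc,
      if_neg (by rintro ⟨h2, -⟩; omega : ¬ (2 ≤ R ∧ idx + 2 * L ≤ labels.length))]
    rcases hrel with ⟨h1, h2⟩ | ⟨L0, r0, hb, hL0, hr0, h1, h2⟩
    · exact Or.inl ⟨h1, h2⟩
    · exact Or.inr ⟨L0, r0, by omega, hL0, hr0, h1, h2⟩
  · rw [if_neg hc,
      if_pos (⟨by omega, hfit⟩ : 2 ≤ R ∧ idx + 2 * L ≤ labels.length)]
    have hR2 : 2 ≤ R := by omega
    have hpos : 0 < L * R - L := by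
      have h2 : L * 2 ≤ L * R := Nat.mul_le_mul_left _ hR2
      omega
    have e1 : L * (R - 1) = L * R - L := by rw [Nat.mul_sub, Nat.mul_one]
    rcases hrel with ⟨h1, h2⟩ | ⟨L0, r0, hb, hL0, hr0, h1, h2⟩
    · subst h1; subst h2
      dsimp only
      rw [if_pos (by simp only [Bool.or_eq_true, decide_eq_true_eq]; exact Or.inl hpos)]
      exact Or.inr ⟨L, R, by omega, hL, hR2, rfl, by rw [e1]⟩
    · subst h1; subst h2
      dsimp only
      have e0 : L0 * (r0 - 1) = L0 * r0 - L0 := by rw [Nat.mul_sub, Nat.mul_one]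
      have hcondB : (tripleGt (L * (R - 1), L, R) (L0 * (r0 - 1), L0, r0) = true) ↔
          (L0 * r0 - L0 < L * R - L ∨ (L * R - L = L0 * r0 - L0 ∧ L0 < L)) := by
        unfold tripleGt
        dsimp only
        rw [e0, e1]
        simp only [Bool.or_eq_true, Bool.and_eq_true, decide_eq_true_eq, beq_iff_eq]
        constructor
        · rintro (h | ⟨h1, (h2 | ⟨h2, h3⟩)⟩)
          · exact Or.inl h
          · exact Or.inr ⟨h1, h2⟩
          · omega
        · rintro (h | ⟨h1, h2⟩)
          · exact Or.inl h
          · exact Or.inr ⟨h1, Or.inl h2⟩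
      have hcondA : ((decide ((L0 * r0 - L0 : Nat) < L * R - L) ||
          ((L * R - L == L0 * r0 - L0) && decide (L0 < L))) = true) ↔
          (L0 * r0 - L0 < L * R - L ∨ (L * R - L = L0 * r0 - L0 ∧ L0 < L)) := by
        simp only [Bool.or_eq_true, Bool.and_eq_true, decide_eq_true_eq, beq_iff_eq]
      by_cases htake : L0 * r0 - L0 < L * R - L ∨ (L * R - L = L0 * r0 - L0 ∧ L0 < L)
      · rw [if_pos (hcondA.mpr htake), if_pos (hcondB.mpr htake)]
        exact Or.inr ⟨L, R, by omega, hL, hR2, rfl, by rw [e1]⟩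
      · rw [if_neg (fun h => htake (hcondA.mp h)), if_neg (fun h => htake (hcondB.mp h))]
        exact Or.inr ⟨L0, r0, by omega, hL0, hr0, rfl, rfl⟩

-- the whole selection fold preserves the relation (all lengths fit at cell idx)
theorem fold_rel (labels : List String) (idx : Nat) (hidx : idx ≤ labels.length) :
    ∀ k st1 stA stB, 0 < st1 → st1 + k ≤ (labels.length - idx) / 2 + 1 →
      spanRel stA stB st1 →
      spanRel ((List.range' st1 k).foldl (findSpanStep labels idx) stA)
              ((List.range' st1 k).foldl (bStep labels idx) stB) (st1 + k) := by
  intro k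
  induction k with
  | zero => intro st1 stA stB h1 _ hrel; simpa using hrel
  | succ k ih =>
      intro st1 stA stB h1 hbnd hrel
      rw [List.range'_succ]
      simp only [List.foldl_cons]
      have hfit : idx + 2 * st1 ≤ labels.length := by
        have hst : st1 ≤ (labels.length - idx) / 2 := by omega
        have := (Nat.le_div_iff_mul_le (by omega : 0 < 2)).mp hst
        omega
      have := ih (st1 + 1) _ _ (by omega) (by omega)
        (step_rel labels idx stA stB st1 h1 hfit hrel)
      have e : st1 + 1 + k = st1 + (k + 1) := by omega
      rwa [e] at this

-- A's span finder agrees (up to tuple shape) with B's table entry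
theorem findSpan_eq (labels : List String) (idx : Nat) (hidx : idx < labels.length) :
    (pyFindRepeatSpan labels idx = none ∧ (bestTable labels).getD idx none = none) ∨
    (∃ L0 r0 s0, pyFindRepeatSpan labels idx = some (L0, r0) ∧
      (bestTable labels).getD idx none = some (s0, L0, r0)) := by
  have htab : (bestTable labels).getD idx none =
      (List.range' 1 ((labels.length - idx) / 2)).foldl (bStep labels idx) none := by
    unfold bestTable
    rw [fold_cell labels idx hidx _ (by intro L hL; rw [List.mem_range'_1] at hL; omega) _
      (by simp)]
    rw [List.getD_eq_getElem?_getD, List.getElem?_replicate]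
    simp only [hidx, if_pos]
    exact fold_trim labels idx hidx none
  have h := fold_rel labels idx (by omega) ((labels.length - idx) / 2) 1 (none, 0) none
    (by omega) (by omega) (Or.inl ⟨rfl, rfl⟩)
  unfold pyFindRepeatSpan
  rw [htab]
  rcases h with ⟨h1, h2⟩ | ⟨L0, r0, _, _, _, h1, h2⟩
  · left; rw [h1, h2]; exact ⟨rfl, rfl⟩
  · right; exact ⟨L0, r0, L0 * (r0 - 1), by rw [h1], h2⟩

-- appending one formatted label per offset is the same as appending the mapped block
theorem foldl_append_map (f : Nat → String) :
    ∀ (l : List Nat) (acc : List String),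
      l.foldl (fun a o => a ++ [f o]) acc = acc ++ l.map f := by
  intro l
  induction l with
  | nil => intro acc; simp
  | cons x t ih => intro acc; simp [ih]

-- the two top-level walks agree step by step
theorem compactGo_eq (labels : List String) :
    ∀ fuel idx acc, compactGoA labels fuel idx acc =
      compactGoB labels (bestTable labels) fuel idx acc := by
  intro fuel
  induction fuel with
  | zero => intro idx acc; rfl
  | succ fuel ih =>
      intro idx acc
      unfold compactGoA compactGoB
      by_cases hidx : idx < labels.length
      · rw [if_pos hidx, if_pos hidx]
        rcases findSpan_eq labels idx hidx with ⟨h1, h2⟩ | ⟨L0, r0, s0, h1, h2⟩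
        · rw [h1, h2]; exact ih _ _
        · rw [h1, h2]
          dsimp only
          rw [foldl_append_map]
          exact ih _ _
      · rw [if_neg hidx, if_neg hidx]

-- ===== VERDICT (by name: the statement is the Claim_ definition above) =====
theorem compact_portal_progress_path_spec : Claim_equal_compact_portal_progress_path := by
  intro node_labels _
  unfold Spec_compact_portal_progress_path
  unfold compact_portal_progress_path compact_portal_progress_path_alt
  exact compactGo_eq node_labels _ 0 []
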